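-- pv_equiv track=rewrite | github.com/zfifteen/prime-gap-structure | experiments/insight_001_modular_congestion_scaling/run_experiment.py | inside_zones
-- ===== SOURCE A (Python) =====
-- def inside_zones(x: int, zones: list[tuple[int, int]]) -> bool:
--     left = 0
--     right = len(zones)
--     while left < right:
--         mid = (left + right) // 2
--         start, end = zones[mid]
--         if x < start:
--             right = mid
--         elif x > end:
--             left = mid + 1
--         else:
--             return True
--     return False
-- ===== SOURCE B (Python) =====
-- def _build(zones):
--     # Build an explicit BST: node = middle element, children built from the halves.
--     if not zones:
--         return None
--     mid = len(zones) // 2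
--     return (zones[mid], _build(zones[:mid]), _build(zones[mid + 1:]))
--
--
-- def inside_zones(x: int, zones: list[tuple[int, int]]) -> bool:
--     # Materialise the implicit search tree of binary search, then walk it.
--     node = _build(zones)
--     while node is not None:
--         (start, end), left, right = node
--         if x < start:
--             node = left
--         elif x > end:
--             node = right
--         else:
--             return True
--     return False
-- ===== Notes on version B (the rewrite author's own statement) =====
-- stated objective: alternative
-- what changed: Instead of an in-place index-pair binary-search loop, B first materialises the implicit search tree as an explicit BST (node = middle zone, subtrees from the two halves) and then answers by walking that tree, which preserves the exact probe sequence and comparison order.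
import Mathlib
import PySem

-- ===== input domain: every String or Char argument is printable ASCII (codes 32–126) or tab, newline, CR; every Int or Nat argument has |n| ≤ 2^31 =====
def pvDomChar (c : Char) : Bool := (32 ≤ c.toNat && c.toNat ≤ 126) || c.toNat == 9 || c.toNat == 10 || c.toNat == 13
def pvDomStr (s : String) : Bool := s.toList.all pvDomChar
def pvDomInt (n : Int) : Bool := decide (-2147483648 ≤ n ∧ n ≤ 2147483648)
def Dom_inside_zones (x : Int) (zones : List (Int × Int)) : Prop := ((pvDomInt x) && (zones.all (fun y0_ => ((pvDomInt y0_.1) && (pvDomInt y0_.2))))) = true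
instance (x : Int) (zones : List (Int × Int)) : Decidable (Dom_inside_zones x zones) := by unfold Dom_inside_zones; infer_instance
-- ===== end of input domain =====

-- B trades the index-pair binary-search loop for an explicit BST built from the list and a tree walk; same probes, same result.

-- ===== PORT A =====
-- the while-loop over the index pair (left, right); indices are always ≥ 0 so they are carried as Nat.
-- The loop halves the interval each step, so fuel = zones.length + 1 ≥ right - left always suffices and
-- the fuel-exhaustion branch is unreachable (a totality guard only; mid = (left+right)//2 is written inline).
def insideLoopF (fuel : Nat) (x : Int) (zones : List (Int × Int)) (left right : Nat) : Bool :=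
  match fuel with
  | 0 => false   -- unreachable: fuel ≥ right - left on every call from inside_zones
  | fuel + 1 =>
    if left < right then
      match zones[(left + right) / 2]? with
      | none => false   -- unreachable: mid < right ≤ zones.length on every call from inside_zones
      | some (s, e) =>
        if x < s then insideLoopF fuel x zones left ((left + right) / 2)
        else if x > e then insideLoopF fuel x zones ((left + right) / 2 + 1) right
        else true
    else false

def inside_zones (x : Int) (zones : List (Int × Int)) : Bool :=
  insideLoopF (zones.length + 1) x zones 0 zones.length

-- ===== PORT B =====
-- an explicit binary search tree: None -> leaf, (zone, left, right) -> node
inductive ZTree where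
  | leaf : ZTree
  | node : Int → Int → ZTree → ZTree → ZTree

-- _build: node from the middle element, subtrees from the slices zones[:mid] / zones[mid+1:]
-- (take / drop are exact for these in-range nonnegative slice bounds).
def buildT (zones : List (Int × Int)) : ZTree :=
  if zones.length = 0 then .leaf
  else
    match zones[zones.length / 2]? with
    | none => .leaf   -- unreachable: len//2 < len for nonempty zones
    | some (s, e) =>
      .node s e (buildT (zones.take (zones.length / 2)))
                (buildT (zones.drop (zones.length / 2 + 1)))
termination_by zones.length
decreasing_by
  · simp [List.length_take]; omega
  · simp [List.length_drop]; omega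

-- the while-loop walking the tree (structural recursion on the tree)
def walkT (x : Int) : ZTree → Bool
  | .leaf => false
  | .node s e l r =>
    if x < s then walkT x l
    else if x > e then walkT x r
    else true

def inside_zones_alt (x : Int) (zones : List (Int × Int)) : Bool :=
  walkT x (buildT zones)

-- ===== PRECONDITION & SPEC =====
def Spec_inside_zones (x : Int) (zones : List (Int × Int)) (out : Bool) : Prop := out = inside_zones_alt x zones
instance (x : Int) (zones : List (Int × Int)) (out : Bool) : Decidable (Spec_inside_zones x zones out) := by unfold Spec_inside_zones; infer_instance

-- ===== CLAIM (what is proved, stated in full; the proofs are below) =====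
def Claim_equal_inside_zones : Prop := ∀ (x : Int) (zones : List (Int × Int)), Dom_inside_zones x zones → Spec_inside_zones x zones (inside_zones x zones)

-- ===== LEMMAS AND PROOFS =====

theorem buildT_nil : buildT [] = .leaf := by
  rw [buildT]; simp

-- The loop on (left, right) equals the tree walk over the tree built from the slice
-- (zones.drop left).take (right - left).
theorem insideLoopF_eq_walk (x : Int) (zones : List (Int × Int)) :
    ∀ fa left right, right - left ≤ fa → left ≤ right → right ≤ zones.length →
      insideLoopF fa x zones left right = walkT x (buildT ((zones.drop left).take (right - left))) := by
  intro fa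
  induction fa with
  | zero =>
    intro left right hfa _ _
    have h0 : right - left = 0 := by omega
    rw [h0]
    simp [insideLoopF, buildT_nil, walkT]
  | succ fa ih =>
    intro left right hfa hle hlen
    by_cases hlr : left < right
    · have hml : (left + right) / 2 < zones.length := by omega
      rcases hP : zones[(left + right) / 2] with ⟨s, e⟩
      have hget : zones[(left + right) / 2]? = some (s, e) := by
        rw [List.getElem?_eq_getElem hml, hP]
      have hsub : ((zones.drop left).take (right - left)).length = right - left := by
        simp [List.length_take, List.length_drop]; omega
      have hgetB : ((zones.drop left).take (right - left))[(right - left) / 2]? = some (s, e) := by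
        rw [List.getElem?_take, if_pos (by omega), List.getElem?_drop]
        have : left + (right - left) / 2 = (left + right) / 2 := by omega
        rw [this, List.getElem?_eq_getElem hml, hP]
      rw [insideLoopF, if_pos hlr, hget]
      rw [buildT]
      rw [if_neg (by omega : ¬ ((zones.drop left).take (right - left)).length = 0)]
      rw [hsub, hgetB]
      rw [walkT]
      by_cases h1 : x < s
      · simp only [if_pos h1]
        rw [ih left ((left + right) / 2) (by omega) (by omega) (by omega)]
        congr 2
        rw [List.take_take]
        congr 1
        omega
      · simp only [if_neg h1]
        by_cases h2 : x > e
        · simp only [if_pos h2]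
          rw [ih ((left + right) / 2 + 1) right (by omega) (by omega) (by omega)]
          congr 2
          rw [List.drop_take, List.drop_drop]
          congr 1
          · omega
          · congr 1
            omega
        · simp only [if_neg h2]
    · have h0 : right - left = 0 := by omega
      rw [h0]
      rw [insideLoopF, if_neg hlr]
      simp [buildT_nil, walkT]

-- ===== VERDICT (by name: the statement is the Claim_ definition above) =====
theorem inside_zones_spec : Claim_equal_inside_zones := by
  intro x zones _hd
  unfold Spec_inside_zones inside_zones inside_zones_alt
  have := insideLoopF_eq_walk x zones (zones.length + 1) 0 zones.length
    (by omega) (Nat.zero_le _) le_rfl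
  simpa using this
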